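-- pv_equiv track=rewrite | github.com/Luke-Grammer/Artificial-Intelligence-Projects | Project 2 - Satisfiability/DPLL.py | find_symbols
-- ===== SOURCE A (Python) =====
-- def find_symbols(KB):
--     """Returns a list of all unique symbols in an arbitrary CNF knowledge base."""
--     symbols = [] # List of symbols initially empty
--     for clause in KB: # Loop through every clause in the KB
--         clause = clause.split()
--         for term in clause: # Loop through every term in clause, adding symbol to list if not already present
--             if term.startswith('-'):
--                 term = term[1:]
--             if term not in symbols:
--                 symbols.append(term)
--     symbols.sort() # Sort symbol list
--     return symbols
-- ===== SOURCE B (Python) =====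
-- def find_symbols(KB):
--     """Returns a list of all unique symbols in an arbitrary CNF knowledge base."""
--     terms = []
--     for clause in KB:
--         for term in clause.split():
--             terms.append(term[1:] if term.startswith('-') else term)
--     terms.sort()
--     result = []
--     for t in terms:
--         if not result or result[-1] != t:
--             result.append(t)
--     return result
-- ===== Notes on version B (the rewrite author's own statement) =====
-- stated objective: faster
-- what changed: B flattens all normalized terms into one list, sorts it, and removes adjacent duplicates in a single pass, instead of A's per-term linear membership scan over the growing symbol list followed by a sort.
import Mathlib
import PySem

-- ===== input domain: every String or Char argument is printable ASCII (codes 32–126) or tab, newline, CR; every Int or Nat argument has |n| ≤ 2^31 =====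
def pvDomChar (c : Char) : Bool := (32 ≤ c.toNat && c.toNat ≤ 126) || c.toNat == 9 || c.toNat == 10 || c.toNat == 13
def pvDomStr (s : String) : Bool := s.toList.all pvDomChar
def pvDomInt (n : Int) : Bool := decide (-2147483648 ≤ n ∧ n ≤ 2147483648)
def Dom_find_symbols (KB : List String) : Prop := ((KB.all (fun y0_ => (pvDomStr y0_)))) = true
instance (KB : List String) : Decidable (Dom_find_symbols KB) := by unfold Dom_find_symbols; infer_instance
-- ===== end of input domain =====

-- B replaces A's per-term linear membership scan by flatten-all-terms, sort, then one adjacent-duplicate-removal pass (alternative algorithm, O(n log n) vs O(n^2)).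


-- ===== PORT A =====
def find_symbols (KB : List String) : List String :=
  let symbols : List String := []
  let symbols := KB.foldl (fun symbols clause =>
    let clause := PySem.Str.split₀ clause
    clause.foldl (fun symbols term =>
      let term := if PySem.Str.startswith term "-" then PySem.Str.slice term (some 1) none else term
      if term ∈ symbols then symbols else symbols ++ [term]) symbols) symbols
  PySem.List.sorted symbols (fun x => x) false

-- ===== PORT B =====
def find_symbols_alt (KB : List String) : List String :=
  let terms : List String := KB.foldl (fun terms clause =>
    (PySem.Str.split₀ clause).foldl (fun terms term =>
      terms ++ [if PySem.Str.startswith term "-" then PySem.Str.slice term (some 1) none else term]) terms) []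
  let terms := PySem.List.sorted terms (fun x => x) false
  terms.foldl (fun result t =>
    if result = [] ∨ PySem.List.pyGet? result (-1) ≠ some t then result ++ [t] else result) []

-- ===== PRECONDITION & SPEC =====
def Spec_find_symbols (KB : List String) (out : List String) : Prop := out = find_symbols_alt KB
instance (KB : List String) (out : List String) : Decidable (Spec_find_symbols KB out) := by unfold Spec_find_symbols; infer_instance

-- ===== CLAIM (what is proved, stated in full; the proofs are below) =====
def Claim_equal_find_symbols : Prop := ∀ (KB : List String), Dom_find_symbols KB → Spec_find_symbols KB (find_symbols KB)

-- ===== LEMMAS AND PROOFS =====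

-- the normalization both programs apply to a term
def pvNorm (term : String) : String :=
  if PySem.Str.startswith term "-" then PySem.Str.slice term (some 1) none else term

-- all normalized terms of the KB, in order
def pvAllTerms (KB : List String) : List String :=
  KB.flatMap (fun c => (PySem.Str.split₀ c).map pvNorm)

-- A's accumulation is Set.update
theorem pvA_acc (KB : List String) (s : PySem.Set String) :
    KB.foldl (fun symbols clause =>
      (PySem.Str.split₀ clause).foldl (fun symbols term =>
        if pvNorm term ∈ symbols then symbols else symbols ++ [pvNorm term]) symbols) s
    = PySem.Set.update s (pvAllTerms KB) := by
  induction KB generalizing s with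
  | nil => simp [pvAllTerms]
  | cons c rest ih =>
      simp only [List.foldl_cons, pvAllTerms, List.flatMap_cons]
      rw [PySem.Set.update_append, ih]
      congr 1
      rw [PySem.Set.update_map_eq_foldl_add]
      have he : (fun (s : PySem.Set String) (t : String) => PySem.Set.add s (pvNorm t))
          = (fun (s : List String) (t : String) =>
              if pvNorm t ∈ s then s else s ++ [pvNorm t]) := by
        funext s' t
        simp [PySem.Set.add_eq_ite]
      rw [he]

-- B's flatten accumulation
theorem pvB_acc (KB : List String) (acc : List String) :
    KB.foldl (fun terms clause =>
      (PySem.Str.split₀ clause).foldl (fun terms term =>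
        terms ++ [pvNorm term]) terms) acc
    = acc ++ pvAllTerms KB := by
  induction KB generalizing acc with
  | nil => simp [pvAllTerms]
  | cons c rest ih =>
      simp only [List.foldl_cons, pvAllTerms, List.flatMap_cons]
      rw [ih]
      have h : ∀ (l : List String) (a : List String),
          l.foldl (fun terms term => terms ++ [pvNorm term]) a = a ++ l.map pvNorm := by
        intro l
        induction l with
        | nil => simp
        | cons x xs ihx =>
            intro a
            rw [List.foldl_cons, ihx]
            simp
      rw [h]
      simp [pvAllTerms]

-- adjacent-duplicate removal, tracking the previously kept element
def pvDedupFrom : Option String → List String → List String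
  | _, [] => []
  | prev, t :: rest =>
      if some t = prev then pvDedupFrom prev rest
      else t :: pvDedupFrom (some t) rest

theorem pvGet_neg_one (xs : List String) : PySem.List.pyGet? xs (-1) = xs.getLast? := by
  cases xs with
  | nil => simp [PySem.List.pyGet?, PySem.List.pyIdx?]
  | cons a l =>
      simp [PySem.List.pyGet?, PySem.List.pyIdx?, List.getLast?_eq_getElem?]

-- B's dedup fold computes pvDedupFrom
theorem pvB_dedup (M : List String) (acc : List String) :
    M.foldl (fun result t =>
      if result = [] ∨ PySem.List.pyGet? result (-1) ≠ some t then result ++ [t] else result) acc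
    = acc ++ pvDedupFrom acc.getLast? M := by
  induction M generalizing acc with
  | nil => simp [pvDedupFrom]
  | cons t rest ih =>
      simp only [List.foldl_cons, pvDedupFrom]
      by_cases h : some t = acc.getLast?
      · have hcond : ¬ (acc = [] ∨ PySem.List.pyGet? acc (-1) ≠ some t) := by
          rcases acc with _ | _
          · simp at h
          · rw [pvGet_neg_one]
            simp [← h]
        rw [if_neg hcond, if_pos h, ih]
      · have hcond : acc = [] ∨ PySem.List.pyGet? acc (-1) ≠ some t := by
          rw [pvGet_neg_one]
          right; intro hc; exact h hc.symm
        rw [if_pos hcond, if_neg h, ih]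
        simp

-- on a ≤-sorted list whose elements all dominate prev, pvDedupFrom is strictly sorted
-- and keeps exactly the elements different from prev
theorem pvDedup_sorted (M : List String) (prev : Option String)
    (hs : M.Pairwise (· ≤ ·)) (hp : ∀ y ∈ M, ∀ v, prev = some v → v ≤ y) :
    (pvDedupFrom prev M).Pairwise (· < ·) ∧
    (∀ x, x ∈ pvDedupFrom prev M ↔ (x ∈ M ∧ some x ≠ prev)) := by
  induction M generalizing prev with
  | nil => simp [pvDedupFrom]
  | cons t rest ih =>
      rcases List.pairwise_cons.mp hs with ⟨hle, hrest⟩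
      by_cases h : some t = prev
      · have ihr := ih prev hrest (by
          intro y hy v hv
          exact le_trans (hp t (by simp) v hv) (hle y hy))
        rw [pvDedupFrom, if_pos h]
        refine ⟨ihr.1, fun x => ?_⟩
        rw [ihr.2]
        constructor
        · rintro ⟨hx, hne⟩; exact ⟨List.mem_cons.mpr (Or.inr hx), hne⟩
        · rintro ⟨hx, hne⟩
          rcases List.mem_cons.mp hx with rfl | hx
          · exact absurd h hne
          · exact ⟨hx, hne⟩
      · have ihr := ih (some t) hrest (by
          intro y hy v hv
          rw [Option.some_inj] at hv; subst hv; exact hle y hy)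
        rw [pvDedupFrom, if_neg h]
        constructor
        · rw [List.pairwise_cons]
          refine ⟨fun y hy => ?_, ihr.1⟩
          rcases (ihr.2 y).mp hy with ⟨hyr, hyne⟩
          exact lt_of_le_of_ne (hle y hyr) (fun he => hyne (by rw [he]))
        · intro x
          simp only [List.mem_cons, ihr.2]
          constructor
          · rintro (rfl | ⟨hx, hne⟩)
            · exact ⟨Or.inl rfl, fun he => h he⟩
            · refine ⟨Or.inr hx, ?_⟩
              rcases prev with _ | v
              · simp
              · intro he
                rw [Option.some_inj] at he; subst he
                have h1 : x ≤ t := hp t (List.mem_cons_self) x rfl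
                have h2 : t ≤ x := hle x hx
                exact h (by rw [le_antisymm h2 h1])
          · rintro ⟨hx, hne⟩
            rcases hx with rfl | hx
            · exact Or.inl rfl
            · by_cases hxt : x = t
              · exact Or.inl hxt
              · exact Or.inr ⟨hx, fun he => hxt (Option.some_inj.mp he)⟩

-- ===== VERDICT (by name: the statement is the Claim_ definition above) =====
theorem find_symbols_spec : Claim_equal_find_symbols := by
  intro KB _
  simp only [Spec_find_symbols, find_symbols, find_symbols_alt]
  simp only [← pvNorm.eq_def]
  rw [pvA_acc, pvB_acc, pvB_dedup]
  simp only [List.nil_append, List.getLast?_nil]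
  rw [PySem.Set.update_nil_left]
  set L := pvAllTerms KB with hL
  have hsorted : (PySem.List.sorted L (fun x => x) false).Pairwise (· ≤ ·) := by
    have := PySem.List.sorted_pairwise L (fun x => x) (κ := String)
    simpa using this
  have hd := pvDedup_sorted (PySem.List.sorted L (fun x => x) false) none hsorted (by simp)
  apply PySem.List.sorted_eq_of_perm_of_pairwise_lt
  · -- perm
    rw [List.perm_ext_iff_of_nodup]
    · intro a
      rw [(hd.2 a)]
      simp [PySem.List.mem_sorted, PySem.Set.mem_ofList]
    · exact hd.1.imp ne_of_lt
    · exact PySem.Set.nodup_ofList L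
  · simpa using hd.1
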